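-- pv_equiv track=rewrite | github.com/HemantHssn/python-scripts | hackerrank/company/simens/simens2.py | ValidCombinations
-- ===== SOURCE A (Python) =====
-- MOD = 998244353
--
-- def ValidCombinations(A, B, C):
--     dp = [[0 for _ in range(C + 1)] for _ in range(A + 1)]
--
--     # Base case: there is only one way to select zero integers
--     dp[0][0] = 1
--
--     for i in range(1, A + 1):
--         for j in range(1, C + 1):
--             dp[i][j] = (dp[i][j] + dp[i - 1][j] * (B - j + 1)) % MOD
--             dp[i][j] = (dp[i][j] + dp[i - 1][j - 1] * (B - 1)) % MOD
--
--     return dp[A][C]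
-- ===== SOURCE B (Python) =====
-- MOD = 998244353
--
-- def ValidCombinations(A, B, C):
--     # Factored form: dp[A][C] = (B-1)^C * h_{A-C}(B, B-1, ..., B-C+1) mod MOD,
--     # where h_k is the complete homogeneous symmetric polynomial, computed by a
--     # rolling in-place DP over the degree k instead of A's full (A+1)x(C+1) table.
--     n = A - C
--     if n < 0:
--         return 0
--     pw = 1
--     for _ in range(C):
--         pw = pw * (B - 1) % MOD
--     h = [1] * (C + 1)
--     for _ in range(n):
--         h[0] = 0
--         for m in range(1, C + 1):
--             h[m] = (h[m - 1] + (B - m + 1) * h[m]) % MOD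
--     return h[C] * pw % MOD
-- ===== Notes on version B (the rewrite author's own statement) =====
-- stated objective: faster
-- what changed: Replaces the full (A+1)x(C+1) DP table by the factored closed form (B-1)^C * h_{A-C}(B,...,B-C+1): a power loop plus a rolling one-row DP over the degree of the complete homogeneous symmetric polynomial.
import Mathlib
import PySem

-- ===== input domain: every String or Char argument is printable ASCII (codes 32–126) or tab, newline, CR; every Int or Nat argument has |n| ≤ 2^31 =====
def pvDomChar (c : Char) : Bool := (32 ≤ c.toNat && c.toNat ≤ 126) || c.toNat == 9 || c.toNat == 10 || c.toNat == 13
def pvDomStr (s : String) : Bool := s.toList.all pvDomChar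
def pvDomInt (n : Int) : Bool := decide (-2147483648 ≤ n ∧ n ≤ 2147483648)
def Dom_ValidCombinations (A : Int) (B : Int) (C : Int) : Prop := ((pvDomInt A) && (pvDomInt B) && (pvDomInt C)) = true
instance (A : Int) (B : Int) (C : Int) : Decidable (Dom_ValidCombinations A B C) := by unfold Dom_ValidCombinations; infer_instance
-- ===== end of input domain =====

-- B replaces A's full (A+1)×(C+1) DP table by the factored form
-- (B-1)^C · h_{A-C}(B,…,B-C+1) with a rolling one-row DP over the degree (faster, O(1) rows of memory).

-- ===== PORT A =====
-- 2-D read dp[i][j]; exact for the nonnegative in-range indices used under Pre_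
-- (out of range Python raises IndexError; Pre_ keeps every index used in range).
def pvGet2 (dp : Array (Array Int)) (i j : Int) : Int :=
  ((dp[i.toNat]?).getD #[])[j.toNat]?.getD 0
-- 2-D write dp[i][j] = v; same exactness note. The slot is cleared first so the
-- row update is unshared (evaluation speed only; the value is an ordinary set).
def pvSet2 (dp : Array (Array Int)) (i j : Int) (v : Int) : Array (Array Int) :=
  let row := (dp[i.toNat]?).getD #[]
  let dp := dp.setIfInBounds i.toNat #[]
  dp.setIfInBounds i.toNat (row.setIfInBounds j.toNat v)

def ValidCombinations (A : Int) (B : Int) (C : Int) : Int :=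
  let dp0 := ((PySem.List.pyRange 0 (A+1) 1).map
    (fun _ => ((PySem.List.pyRange 0 (C+1) 1).map (fun _ => (0:Int))).toArray)).toArray
  let dp1 := pvSet2 dp0 0 0 1
  let dp2 := (PySem.List.pyRange 1 (A+1) 1).foldl (fun dp i =>
    (PySem.List.pyRange 1 (C+1) 1).foldl (fun dp j =>
      let dp := pvSet2 dp i j
        (PySem.Int.mod (pvGet2 dp i j + pvGet2 dp (i-1) j * (B - j + 1)) 998244353)
      pvSet2 dp i j
        (PySem.Int.mod (pvGet2 dp i j + pvGet2 dp (i-1) (j-1) * (B - 1)) 998244353)) dp) dp1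
  pvGet2 dp2 A C

-- ===== PORT B =====
-- 1-D read h[i] / write h[i] = v; exact for the nonnegative in-range indices
-- used under Pre_ (out of range Python raises IndexError).
def pvGetH (h : Array Int) (i : Int) : Int := (h[i.toNat]?).getD 0
def pvSetH (h : Array Int) (i : Int) (v : Int) : Array Int := h.setIfInBounds i.toNat v

def ValidCombinations_alt (A : Int) (B : Int) (C : Int) : Int :=
  let n := A - C
  if n < 0 then 0
  else
    let pw := (PySem.List.pyRange 0 C 1).foldl
      (fun pw _ => PySem.Int.mod (pw * (B - 1)) 998244353) 1
    let h0 : Array Int := Array.replicate (C + 1).toNat 1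
    let h := (PySem.List.pyRange 0 n 1).foldl (fun h _ =>
      (PySem.List.pyRange 1 (C + 1) 1).foldl (fun h m =>
        pvSetH h m (PySem.Int.mod
          (pvGetH h (m - 1) + (B - m + 1) * pvGetH h m) 998244353))
        (pvSetH h 0 0)) h0
    PySem.Int.mod (pvGetH h C * pw) 998244353

-- ===== PRECONDITION & SPEC =====
-- A raises IndexError when A < 0 (empty dp) or C < 0 (empty rows); exactly those are excluded.
def Pre_ValidCombinations (A : Int) (B : Int) (C : Int) : Prop := 0 ≤ A ∧ 0 ≤ C
instance (A : Int) (B : Int) (C : Int) : Decidable (Pre_ValidCombinations A B C) := by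
  unfold Pre_ValidCombinations; infer_instance
def pvWitness_ValidCombinations : Int × Int × Int := (3, 5, 2)

def Spec_ValidCombinations (A : Int) (B : Int) (C : Int) (out : Int) : Prop := out = ValidCombinations_alt A B C
instance (A : Int) (B : Int) (C : Int) (out : Int) : Decidable (Spec_ValidCombinations A B C out) := by unfold Spec_ValidCombinations; infer_instance

-- ===== CLAIM (what is proved, stated in full; the proofs are below) =====
def Claim_equal_ValidCombinations : Prop := ∀ (A : Int) (B : Int) (C : Int), Dom_ValidCombinations A B C → Pre_ValidCombinations A B C → Spec_ValidCombinations A B C (ValidCombinations A B C)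

-- ===== LEMMAS AND PROOFS =====

-- model of A's table entry dp[i][j]
def dpM (Bv : Int) : Nat → Nat → Int
  | 0, 0 => 1
  | 0, _+1 => 0
  | _+1, 0 => 0
  | i+1, j+1 => ((0 + dpM Bv i (j+1) * (Bv - (j+1 : Nat) + 1)) % 998244353
      + dpM Bv i j * (Bv - 1)) % 998244353

-- model of B's row entry h_k(m)
def hM (Bv : Int) : Nat → Nat → Int
  | 0, _ => 1
  | _+1, 0 => 0
  | k+1, m+1 => (hM Bv (k+1) m + (Bv - (m+1 : Nat) + 1) * hM Bv k (m+1)) % 998244353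

-- model of B's pw after k steps
def pwM (Bv : Int) : Nat → Int
  | 0 => 1
  | k+1 => pwM Bv k * (Bv - 1) % 998244353

theorem pvCastMod (a : Int) : ((a % 998244353 : Int) : ZMod 998244353) = a := by
  have := ZMod.intCast_mod a 998244353
  push_cast at this ⊢
  exact this

theorem pvIntEq (x y : Int) (h1 : 0 ≤ x) (h2 : x < 998244353) (h3 : 0 ≤ y)
    (h4 : y < 998244353) (h : (x : ZMod 998244353) = (y : ZMod 998244353)) : x = y := by
  rw [ZMod.intCast_eq_intCast_iff'] at h
  rwa [Int.emod_eq_of_lt h1 (by exact_mod_cast h2),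
       Int.emod_eq_of_lt h3 (by exact_mod_cast h4)] at h

theorem dpM_zero_of_gt (Bv : Int) : ∀ a c : Nat, a < c → dpM Bv a c = 0
  | 0, _+1, _ => rfl
  | a+1, c+1, h => by
      simp [dpM, dpM_zero_of_gt Bv a (c+1) (by omega), dpM_zero_of_gt Bv a c (by omega)]

theorem dpM_bounds (Bv : Int) (a c : Nat) : 0 ≤ dpM Bv a c ∧ dpM Bv a c < 998244353 := by
  rcases a with _|a <;> rcases c with _|c
  · norm_num [dpM]
  · norm_num [dpM]
  · norm_num [dpM]
  · simp only [dpM]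
    exact ⟨Int.emod_nonneg _ (by norm_num), Int.emod_lt_of_pos _ (by norm_num)⟩

theorem hZ_rec (Bv : Int) (k m : Nat) :
    ((hM Bv (k+1) (m+1) : Int) : ZMod 998244353) =
      ((hM Bv (k+1) m : Int) : ZMod 998244353)
        + ((Bv : ZMod 998244353) - (m+1 : Nat) + 1) * ((hM Bv k (m+1) : Int) : ZMod 998244353) := by
  simp only [hM]
  rw [pvCastMod]
  push_cast
  ring

theorem dpZ_eq (Bv : Int) (a : Nat) : ∀ c : Nat,
    ((dpM Bv a c : Int) : ZMod 998244353) =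
      if c ≤ a then ((Bv : ZMod 998244353) - 1)^c * ((hM Bv (a-c) c : Int) : ZMod 998244353)
      else 0 := by
  induction a with
  | zero =>
    intro c
    rcases c with _|c
    · simp [dpM, hM]
    · simp [dpM]
  | succ a ih =>
    intro c
    rcases c with _|c
    · simp [dpM, hM]
    · have L : ((dpM Bv (a+1) (c+1) : Int) : ZMod 998244353) =
          ((dpM Bv a (c+1) : Int) : ZMod 998244353) * ((Bv : ZMod 998244353) - (c+1 : Nat) + 1)
            + ((dpM Bv a c : Int) : ZMod 998244353) * ((Bv : ZMod 998244353) - 1) := by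
        simp only [dpM]
        rw [pvCastMod]
        push_cast [pvCastMod]
        ring
      rw [L, ih (c+1), ih c]
      by_cases h1 : c + 1 ≤ a
      · rw [if_pos h1, if_pos (by omega : c ≤ a), if_pos (by omega : c + 1 ≤ a + 1)]
        obtain ⟨d, hd⟩ : ∃ d, a - (c+1) = d := ⟨_, rfl⟩
        have h2 : a - c = d + 1 := by omega
        have h3 : a + 1 - (c+1) = d + 1 := by omega
        rw [hd, h2, h3, hZ_rec]
        push_cast
        ring
      · by_cases h2 : c ≤ a
        · have hca : c = a := by omega
          subst hca
          rw [if_neg h1, if_pos (le_refl c), if_pos (by omega : c + 1 ≤ c + 1)]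
          simp only [Nat.sub_self]
          simp only [hM, Int.cast_one]
          ring
        · rw [if_neg h1, if_neg h2, if_neg (by omega : ¬ c + 1 ≤ a + 1)]
          ring

theorem pwZ (Bv : Int) (c : Nat) :
    ((pwM Bv c : Int) : ZMod 998244353) = ((Bv : ZMod 998244353) - 1)^c := by
  induction c with
  | zero => simp [pwM]
  | succ c ih =>
    simp only [pwM]
    rw [pvCastMod]
    push_cast
    rw [ih]
    ring

theorem models_agree (Bv : Int) (a c : Nat) :
    dpM Bv a c = if c ≤ a then (hM Bv (a - c) c * pwM Bv c) % 998244353 else 0 := by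
  by_cases h : c ≤ a
  · rw [if_pos h]
    refine pvIntEq _ _ (dpM_bounds Bv a c).1 (dpM_bounds Bv a c).2
      (Int.emod_nonneg _ (by norm_num)) (Int.emod_lt_of_pos _ (by norm_num)) ?_
    rw [dpZ_eq, if_pos h, pvCastMod]
    push_cast
    rw [pwZ]
    ring
  · rw [if_neg h]
    exact dpM_zero_of_gt Bv a c (by omega)

theorem pw_fold (Bv : Int) (l : List Int) : ∀ k : Nat,
    l.foldl (fun pw _ => PySem.Int.mod (pw * (Bv - 1)) 998244353) (pwM Bv k)
      = pwM Bv (k + l.length) := by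
  induction l with
  | nil => simp
  | cons a l ih =>
    intro k
    rw [List.foldl_cons]
    have hstep : PySem.Int.mod (pwM Bv k * (Bv - 1)) 998244353 = pwM Bv (k+1) := by
      rw [PySem.Int.mod_eq_emod_of_pos (by norm_num)]
      rfl
    rw [hstep, ih (k+1)]
    congr 1
    simp
    omega

def repH (c : Nat) (F : Nat → Int) : Array Int := ((List.range (c+1)).map F).toArray

-- B's row inside sweep k+1: new values up to column jd, old values beyond
def HRow (Bv : Int) (k jd : Nat) : Nat → Int :=
  fun t => if t ≤ jd then hM Bv (k+1) t else hM Bv k t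

theorem repH_congr (c : Nat) (F G : Nat → Int) (h : ∀ t, t ≤ c → F t = G t) :
    repH c F = repH c G := by
  unfold repH
  congr 1
  apply List.map_congr_left
  intro t ht
  exact h t (Nat.lt_succ_iff.mp (List.mem_range.mp ht))

theorem pvGetH_rep (c t : Nat) (F : Nat → Int) (ht : t ≤ c) :
    pvGetH (repH c F) (t : Int) = F t := by
  unfold pvGetH repH
  simp [Nat.lt_succ_of_le ht]

theorem pvSetH_rep (c t : Nat) (F : Nat → Int) (v : Int) (ht : t ≤ c) :
    pvSetH (repH c F) (t : Int) v = repH c (fun t' => if t' = t then v else F t') := by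
  unfold pvSetH repH
  simp only [Int.toNat_natCast, List.setIfInBounds_toArray]
  congr 1
  apply List.ext_getElem
  · simp
  intro i h1 h2
  simp only [List.getElem_set, List.getElem_map, List.getElem_range] at *
  by_cases hit : t = i
  · subst hit
    simp
  · simp [hit, Ne.symm hit]

theorem innerB (Bv : Int) (c k : Nat) (j : Nat) (hj : 1 ≤ j) (hjc : j ≤ c + 1) :
    ((PySem.List.pyRange (j : Int) ((c : Int) + 1) 1).foldl (fun h m =>
        pvSetH h m (PySem.Int.mod
          (pvGetH h (m - 1) + (Bv - m + 1) * pvGetH h m) 998244353))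
      (repH c (HRow Bv k (j - 1))))
    = repH c (HRow Bv k c) := by
  by_cases hend : j = c + 1
  · subst hend
    rw [PySem.List.pyRange_one_eq_nil (by omega)]
    simp [List.foldl_nil]
  · have hjle : j ≤ c := by omega
    rw [PySem.List.pyRange_one_cons (by omega), List.foldl_cons]
    have hcast1 : (j : Int) - 1 = ((j - 1 : Nat) : Int) := by push_cast [hj]; ring
    have hg1 : pvGetH (repH c (HRow Bv k (j-1))) ((j : Int) - 1) = hM Bv (k+1) (j-1) := by
      rw [hcast1, pvGetH_rep c (j-1) _ (by omega)]
      simp [HRow]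
    have hg2 : pvGetH (repH c (HRow Bv k (j-1))) (j : Int) = hM Bv k j := by
      rw [pvGetH_rep c j _ hjle]
      simp only [HRow]
      rw [if_neg (by omega : ¬ j ≤ j - 1)]
    have hval : PySem.Int.mod (hM Bv (k+1) (j-1) + (Bv - (j : Int) + 1) * hM Bv k j) 998244353
        = hM Bv (k+1) j := by
      obtain ⟨j', hj'⟩ : ∃ j', j = j' + 1 := ⟨j - 1, by omega⟩
      subst hj'
      rw [PySem.Int.mod_eq_emod_of_pos (by norm_num)]
      simp only [hM, Nat.add_sub_cancel]
    have hset : pvSetH (repH c (HRow Bv k (j-1))) (j : Int) (hM Bv (k+1) j)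
        = repH c (HRow Bv k j) := by
      rw [pvSetH_rep c j _ _ hjle]
      apply repH_congr
      intro t ht
      simp only [HRow]
      by_cases h1 : t = j
      · rw [if_pos h1, if_pos (by omega : t ≤ j), h1]
      · rw [if_neg h1]
        by_cases h2 : t ≤ j - 1
        · rw [if_pos h2, if_pos (by omega : t ≤ j)]
        · rw [if_neg h2, if_neg (by omega : ¬ t ≤ j)]
    rw [hg1, hg2, hval, hset]
    have hnext := innerB Bv c k (j+1) (by omega) (by omega)
    have hjj : ((j + 1 : Nat) : Int) = (j : Int) + 1 := by push_cast; ring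
    rw [hjj, Nat.add_sub_cancel] at hnext
    exact hnext
termination_by c + 1 - j

theorem outerB (Bv : Int) (c : Nat) (l : List Int) : ∀ k : Nat,
    l.foldl (fun h _ =>
      (PySem.List.pyRange 1 ((c : Int) + 1) 1).foldl (fun h m =>
        pvSetH h m (PySem.Int.mod
          (pvGetH h (m - 1) + (Bv - m + 1) * pvGetH h m) 998244353))
        (pvSetH h 0 0))
      (repH c (fun t => hM Bv k t))
    = repH c (fun t => hM Bv (k + l.length) t) := by
  induction l with
  | nil => simp
  | cons a l ih =>
    intro k
    rw [List.foldl_cons]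
    have hset0 : pvSetH (repH c (fun t => hM Bv k t)) 0 0 = repH c (HRow Bv k 0) := by
      have h := pvSetH_rep c 0 (fun t => hM Bv k t) 0 (Nat.zero_le c)
      norm_num at h
      rw [h]
      apply repH_congr
      intro t ht
      simp only [HRow]
      by_cases h1 : t = 0
      · rw [if_pos h1, if_pos (by omega : t ≤ 0), h1]
        simp [hM]
      · rw [if_neg h1, if_neg (by omega : ¬ t ≤ 0)]
    have hinner := innerB Bv c k 1 (le_refl 1) (by omega)
    simp only [Nat.cast_one, Nat.sub_self] at hinner
    have hrowc : repH c (HRow Bv k c) = repH c (fun t => hM Bv (k+1) t) := by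
      apply repH_congr
      intro t ht
      simp [HRow, ht]
    rw [hset0, hinner, hrowc, ih (k+1)]
    have hlen : (a::l).length = l.length + 1 := by simp
    rw [hlen]
    have hk : k + (l.length + 1) = k + 1 + l.length := by omega
    rw [hk]

def pvRep (a c : Nat) (F : Nat → Nat → Int) : Array (Array Int) :=
  ((List.range (a+1)).map (fun t => ((List.range (c+1)).map (F t)).toArray)).toArray

-- A's table after finishing outer iterations up to i
def DR (Bv : Int) (i : Nat) : Nat → Nat → Int :=
  fun t j => if t ≤ i then dpM Bv t j else 0

-- A's table inside outer iteration i, inner loop done up to column jd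
def DI (Bv : Int) (i jd : Nat) : Nat → Nat → Int :=
  fun t j => if t < i then dpM Bv t j else if t = i ∧ j ≤ jd then dpM Bv i j else 0

theorem rep_congr (a c : Nat) (F G : Nat → Nat → Int)
    (h : ∀ t, t ≤ a → ∀ j, j ≤ c → F t j = G t j) : pvRep a c F = pvRep a c G := by
  unfold pvRep
  congr 1
  apply List.map_congr_left
  intro t ht
  congr 1
  apply List.map_congr_left
  intro j hj
  exact h t (Nat.lt_succ_iff.mp (List.mem_range.mp ht)) j
    (Nat.lt_succ_iff.mp (List.mem_range.mp hj))

theorem pvGet2_rep (a c t j : Nat) (F : Nat → Nat → Int) (ht : t ≤ a) (hj : j ≤ c) :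
    pvGet2 (pvRep a c F) (t : Int) (j : Int) = F t j := by
  unfold pvGet2 pvRep
  simp [Nat.lt_succ_of_le ht, Nat.lt_succ_of_le hj]

theorem pvSet2_rep (a c t j : Nat) (F : Nat → Nat → Int) (v : Int) (ht : t ≤ a) (hj : j ≤ c) :
    pvSet2 (pvRep a c F) (t : Int) (j : Int) v
      = pvRep a c (fun t' j' => if t' = t ∧ j' = j then v else F t' j') := by
  unfold pvSet2 pvRep
  have hrow : (((((List.range (a+1)).map
        (fun t' => ((List.range (c+1)).map (F t')).toArray)).toArray)[(t : Int).toNat]?).getD #[])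
      = ((List.range (c+1)).map (F t)).toArray := by
    simp [Nat.lt_succ_of_le ht]
  rw [hrow]
  simp only [Int.toNat_natCast, List.setIfInBounds_toArray, List.set_set]
  congr 1
  apply List.ext_getElem
  · simp
  intro i h1 h2
  simp only [List.getElem_set, List.getElem_map, List.getElem_range] at *
  by_cases hit : t = i
  · subst hit
    rw [if_pos rfl]
    congr 1
    apply List.ext_getElem
    · simp
    intro i' h1' h2'
    simp only [List.getElem_set, List.getElem_map, List.getElem_range] at *
    by_cases hji : j = i'
    · subst hji
      simp
    · simp [hji, Ne.symm hji]
  · rw [if_neg hit]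
    simp [Ne.symm hit]

theorem innerA (Bv : Int) (a c i : Nat) (hi : 1 ≤ i) (hia : i ≤ a)
    (j : Nat) (hj : 1 ≤ j) (hjc : j ≤ c + 1) :
    ((PySem.List.pyRange (j : Int) ((c : Int) + 1) 1).foldl (fun dp jj =>
        pvSet2 (pvSet2 dp (i : Int) jj
            (PySem.Int.mod (pvGet2 dp (i : Int) jj
              + pvGet2 dp ((i : Int) - 1) jj * (Bv - jj + 1)) 998244353))
          (i : Int) jj
          (PySem.Int.mod (pvGet2 (pvSet2 dp (i : Int) jj
              (PySem.Int.mod (pvGet2 dp (i : Int) jj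
                + pvGet2 dp ((i : Int) - 1) jj * (Bv - jj + 1)) 998244353)) (i : Int) jj
            + pvGet2 (pvSet2 dp (i : Int) jj
              (PySem.Int.mod (pvGet2 dp (i : Int) jj
                + pvGet2 dp ((i : Int) - 1) jj * (Bv - jj + 1)) 998244353)) ((i : Int) - 1) (jj - 1)
              * (Bv - 1)) 998244353))
      (pvRep a c (DI Bv i (j - 1))))
    = pvRep a c (DI Bv i c) := by
  by_cases hend : j = c + 1
  · subst hend
    rw [PySem.List.pyRange_one_eq_nil (by push_cast; omega)]
    simp [List.foldl_nil]
  · have hjle : j ≤ c := by omega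
    rw [PySem.List.pyRange_one_cons (by omega), List.foldl_cons]
    have hcast1 : (j : Int) - 1 = ((j - 1 : Nat) : Int) := by push_cast [hj]; ring
    have hcast2 : (i : Int) - 1 = ((i - 1 : Nat) : Int) := by push_cast [hi]; ring
    have hg1 : pvGet2 (pvRep a c (DI Bv i (j-1))) (i : Int) (j : Int) = 0 := by
      rw [pvGet2_rep a c i j _ hia hjle]
      simp [DI]
      omega
    have hg2 : pvGet2 (pvRep a c (DI Bv i (j-1))) ((i : Int) - 1) (j : Int) = dpM Bv (i-1) j := by
      rw [hcast2, pvGet2_rep a c (i-1) j _ (by omega) hjle]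
      simp [DI]
      omega
    set v1 := PySem.Int.mod (0 + dpM Bv (i-1) j * (Bv - (j : Int) + 1)) 998244353 with hv1
    have hs1 : pvSet2 (pvRep a c (DI Bv i (j-1))) (i : Int) (j : Int)
        (PySem.Int.mod (pvGet2 (pvRep a c (DI Bv i (j-1))) (i : Int) (j : Int)
          + pvGet2 (pvRep a c (DI Bv i (j-1))) ((i : Int) - 1) (j : Int) * (Bv - (j : Int) + 1)) 998244353)
        = pvRep a c (fun t' j' => if t' = i ∧ j' = j then v1 else DI Bv i (j-1) t' j') := by
      rw [hg1, hg2, pvSet2_rep a c i j _ _ hia hjle]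
    have hg3 : pvGet2 (pvRep a c (fun t' j' => if t' = i ∧ j' = j then v1 else DI Bv i (j-1) t' j'))
        (i : Int) (j : Int) = v1 := by
      rw [pvGet2_rep a c i j _ hia hjle]
      simp
    have hg4 : pvGet2 (pvRep a c (fun t' j' => if t' = i ∧ j' = j then v1 else DI Bv i (j-1) t' j'))
        ((i : Int) - 1) ((j : Int) - 1) = dpM Bv (i-1) (j-1) := by
      rw [hcast1, hcast2, pvGet2_rep a c (i-1) (j-1) _ (by omega) (by omega)]
      have : ¬ (i - 1 = i ∧ j - 1 = j) := by omega
      rw [if_neg this]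
      simp [DI]
      omega
    have hv2 : PySem.Int.mod (v1 + dpM Bv (i-1) (j-1) * (Bv - 1)) 998244353 = dpM Bv i j := by
      obtain ⟨i', hi'⟩ : ∃ i', i = i' + 1 := ⟨i - 1, by omega⟩
      obtain ⟨j', hj'⟩ : ∃ j', j = j' + 1 := ⟨j - 1, by omega⟩
      subst hi' hj'
      rw [hv1]
      rw [PySem.Int.mod_eq_emod_of_pos (by norm_num), PySem.Int.mod_eq_emod_of_pos (by norm_num)]
      simp only [dpM, Nat.add_sub_cancel]
    have hs2 : pvSet2 (pvRep a c (fun t' j' => if t' = i ∧ j' = j then v1 else DI Bv i (j-1) t' j'))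
        (i : Int) (j : Int) (PySem.Int.mod (v1 + dpM Bv (i-1) (j-1) * (Bv - 1)) 998244353)
        = pvRep a c (DI Bv i j) := by
      rw [hv2, pvSet2_rep a c i j _ _ hia hjle]
      apply rep_congr
      intro t ht j'' hj''
      simp only [DI]
      by_cases h1 : t = i ∧ j'' = j
      · rw [if_pos h1]
        rw [if_neg (by omega : ¬ t < i), if_pos (by omega : t = i ∧ j'' ≤ j), h1.2]
      · rw [if_neg h1, if_neg h1]
        by_cases h2 : t < i
        · rw [if_pos h2, if_pos h2]
        · rw [if_neg h2, if_neg h2]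
          by_cases h3 : t = i ∧ j'' ≤ j - 1
          · rw [if_pos h3, if_pos (by omega : t = i ∧ j'' ≤ j)]
          · rw [if_neg h3, if_neg (by omega : ¬ (t = i ∧ j'' ≤ j))]
    rw [hs1, hg3, hg4, hs2]
    have hnext := innerA Bv a c i hi hia (j+1) (by omega) (by omega)
    have hjj : ((j + 1 : Nat) : Int) = (j : Int) + 1 := by push_cast; ring
    rw [hjj] at hnext
    have hjd : j + 1 - 1 = j := by omega
    rw [hjd] at hnext
    exact hnext
termination_by c + 1 - j

theorem outerA (Bv : Int) (a c : Nat)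
    (i : Nat) (hi : 1 ≤ i) (hia : i ≤ a + 1) :
    ((PySem.List.pyRange (i : Int) ((a : Int) + 1) 1).foldl (fun dp ii =>
      (PySem.List.pyRange 1 ((c : Int) + 1) 1).foldl (fun dp jj =>
        pvSet2 (pvSet2 dp ii jj
            (PySem.Int.mod (pvGet2 dp ii jj
              + pvGet2 dp (ii - 1) jj * (Bv - jj + 1)) 998244353))
          ii jj
          (PySem.Int.mod (pvGet2 (pvSet2 dp ii jj
              (PySem.Int.mod (pvGet2 dp ii jj
                + pvGet2 dp (ii - 1) jj * (Bv - jj + 1)) 998244353)) ii jj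
            + pvGet2 (pvSet2 dp ii jj
              (PySem.Int.mod (pvGet2 dp ii jj
                + pvGet2 dp (ii - 1) jj * (Bv - jj + 1)) 998244353)) (ii - 1) (jj - 1)
              * (Bv - 1)) 998244353)) dp)
      (pvRep a c (DR Bv (i - 1))))
    = pvRep a c (DR Bv a) := by
  by_cases hend : i = a + 1
  · subst hend
    have hnil : PySem.List.pyRange ((a + 1 : Nat) : Int) ((a : Int) + 1) 1 = [] :=
      PySem.List.pyRange_one_eq_nil (by push_cast; omega)
    rw [hnil]
    simp [List.foldl_nil]
  · have hile : i ≤ a := by omega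
    have hcons : PySem.List.pyRange (i : Int) ((a : Int) + 1) 1
        = (i : Int) :: PySem.List.pyRange ((i : Int) + 1) ((a : Int) + 1) 1 :=
      PySem.List.pyRange_one_cons (by omega)
    rw [hcons, List.foldl_cons]
    have hDI0 : pvRep a c (DR Bv (i - 1)) = pvRep a c (DI Bv i 0) := by
      apply rep_congr
      intro t ht j hj
      simp only [DR, DI]
      by_cases h2 : t < i
      · rw [if_pos (by omega : t ≤ i - 1), if_pos h2]
      · rw [if_neg (by omega : ¬ t ≤ i - 1), if_neg h2]
        by_cases h3 : t = i ∧ j ≤ 0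
        · rw [if_pos h3]
          have hj0 : j = 0 := by omega
          obtain ⟨i', hi'⟩ : ∃ i', i = i' + 1 := ⟨i - 1, by omega⟩
          subst hi'
          rw [hj0]
          simp [dpM]
        · rw [if_neg h3]
    have hinner := innerA Bv a c i hi hile 1 (le_refl 1) (by omega)
    have h10 : (1 : Nat) - 1 = 0 := rfl
    rw [h10] at hinner
    have h1c : ((1 : Nat) : Int) = (1 : Int) := by norm_num
    rw [h1c] at hinner
    have hDIc : pvRep a c (DI Bv i c) = pvRep a c (DR Bv i) := by
      apply rep_congr
      intro t ht j hj
      simp only [DR, DI]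
      by_cases h2 : t < i
      · rw [if_pos h2, if_pos (by omega : t ≤ i)]
      · by_cases h3 : t = i
        · rw [if_neg h2, if_pos ⟨h3, hj⟩, if_pos (by omega : t ≤ i), h3]
        · rw [if_neg h2, if_neg (by simp [h3]), if_neg (by omega : ¬ t ≤ i)]
    rw [hDI0, hinner, hDIc]
    have hnext := outerA Bv a c (i+1) (by omega) (by omega)
    have hii : ((i + 1 : Nat) : Int) = (i : Int) + 1 := by push_cast; ring
    rw [hii, Nat.add_sub_cancel] at hnext
    exact hnext
termination_by a + 1 - i

theorem ValidCombinations_eq_model (A B C : Int) (hA : 0 ≤ A) (hC : 0 ≤ C) :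
    ValidCombinations A B C = dpM B A.toNat C.toNat := by
  obtain ⟨a, ha⟩ : ∃ a : Nat, A = (a : Int) := ⟨A.toNat, by omega⟩
  obtain ⟨c, hc⟩ : ∃ c : Nat, C = (c : Int) := ⟨C.toNat, by omega⟩
  subst ha hc
  simp only [ValidCombinations, Int.toNat_natCast]
  have e1 : ((a : Int) + 1) = ((a + 1 : Nat) : Int) := by push_cast; ring
  have e2 : ((c : Int) + 1) = ((c + 1 : Nat) : Int) := by push_cast; ring
  have hdp0 : ((PySem.List.pyRange 0 ((a : Int) + 1) 1).map
      (fun _ => ((PySem.List.pyRange 0 ((c : Int) + 1) 1).map (fun _ => (0 : Int))).toArray)).toArray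
      = pvRep a c (fun _ _ => (0 : Int)) := by
    rw [e1, e2, PySem.List.pyRange_zero_natCast, PySem.List.pyRange_zero_natCast]
    simp [pvRep, List.map_map, Function.comp_def]
  rw [hdp0]
  have hdp1 : pvSet2 (pvRep a c (fun _ _ => (0 : Int))) 0 0 1 = pvRep a c (DR B 0) := by
    have h := pvSet2_rep a c 0 0 (fun _ _ => (0 : Int)) 1 (Nat.zero_le a) (Nat.zero_le c)
    norm_num at h
    rw [h]
    apply rep_congr
    intro t ht j hj
    simp only [DR]
    by_cases h1 : t = 0 ∧ j = 0
    · rw [if_pos h1, if_pos (by omega : t ≤ 0), h1.1, h1.2]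
      simp [dpM]
    · rw [if_neg h1]
      by_cases h2 : t ≤ 0
      · have ht0 : t = 0 := by omega
        obtain ⟨j', hj'⟩ : ∃ j', j = j' + 1 := ⟨j - 1, by omega⟩
        subst hj'
        rw [if_pos h2, ht0]
        simp [dpM]
      · rw [if_neg h2]
  rw [hdp1]
  have hout := outerA B a c 1 (le_refl 1) (by omega)
  simp only [Nat.cast_one, Nat.sub_self] at hout
  rw [hout]
  rw [pvGet2_rep a c a c _ (le_refl a) (le_refl c)]
  simp [DR]

theorem alt_eq_model (A B C : Int) (hA : 0 ≤ A) (hC : 0 ≤ C) :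
    ValidCombinations_alt A B C =
      if A - C < 0 then 0
      else (hM B (A - C).toNat C.toNat * pwM B C.toNat) % 998244353 := by
  by_cases h : A - C < 0
  · simp [ValidCombinations_alt, h]
  · obtain ⟨c, hc⟩ : ∃ c : Nat, C = (c : Int) := ⟨C.toNat, by omega⟩
    obtain ⟨n, hn⟩ : ∃ n : Nat, A - C = (n : Int) := ⟨(A - C).toNat, by omega⟩
    subst hc
    rw [if_neg h]
    simp only [ValidCombinations_alt, hn]
    rw [if_neg (by omega : ¬ (n : Int) < 0)]
    have hrep : ((c : Int) + 1).toNat = c + 1 := by omega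
    have hpw : (PySem.List.pyRange 0 (c : Int) 1).foldl
        (fun pw _ => PySem.Int.mod (pw * (B - 1)) 998244353) 1 = pwM B c := by
      have := pw_fold B (PySem.List.pyRange 0 (c : Int) 1) 0
      simpa [pwM, PySem.List.pyRange_zero_natCast] using this
    have hh0 : Array.replicate (c + 1) (1 : Int) = repH c (fun t => hM B 0 t) := by
      unfold repH
      rw [← List.toArray_replicate]
      congr 1
      simp [hM, List.map_const']
    have hh : (PySem.List.pyRange 0 (n : Int) 1).foldl (fun h _ =>
        (PySem.List.pyRange 1 ((c : Int) + 1) 1).foldl (fun h m =>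
          pvSetH h m (PySem.Int.mod
            (pvGetH h (m - 1) + (B - m + 1) * pvGetH h m) 998244353))
          (pvSetH h 0 0)) (Array.replicate (c + 1) (1 : Int))
        = repH c (fun t => hM B n t) := by
      rw [hh0]
      have := outerB B c (PySem.List.pyRange 0 (n : Int) 1) 0
      simpa [PySem.List.pyRange_zero_natCast] using this
    rw [hrep, hpw, hh]
    rw [pvGetH_rep c c _ (le_refl c), PySem.Int.mod_eq_emod_of_pos (by norm_num)]
    congr 2

-- ===== VERDICT (by name: the statement is the Claim_ definition above) =====
theorem ValidCombinations_spec : Claim_equal_ValidCombinations := by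
  intro A B C _ hPre
  unfold Spec_ValidCombinations
  obtain ⟨hA, hC⟩ := hPre
  rw [ValidCombinations_eq_model A B C hA hC, alt_eq_model A B C hA hC, models_agree]
  have ht : (A - C).toNat = A.toNat - C.toNat := by omega
  by_cases h : A - C < 0
  · rw [if_pos h, if_neg (by omega : ¬ C.toNat ≤ A.toNat)]
  · rw [if_neg h, if_pos (by omega : C.toNat ≤ A.toNat), ht]
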